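-- pv_equiv track=rewrite | github.com/MarGabor/PSTAR-MSA | DALIBENCH.py | argmax_intersection
-- ===== SOURCE A (Python) =====
-- def argmax_intersection(set_1, set_2):
--
--     #make copies of original sets
--     orig_set_1 = set_1.copy()
--     orig_set_2 = set_2.copy()
--
--     #initial shift bounds +-1000
--     shift_bounds = range(1000,-1001,-1)
--     max_intersection = orig_set_1.intersection(orig_set_2)
--     cur_max = len(max_intersection)
--     cur_argmax = orig_set_2
--     max_shift = 0
--     for shift in shift_bounds:
--         new_set_2 = set()
--         set_intersection = set()
--         for element in set_2:
--             y = element[0][1] + shift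
--             b = element[1][1] + shift
--             x = element[0][0]
--             a = element[1][0]
--             new_set_2.add(((x,y),(a,b)))
--         set_intersection = set_1.intersection(new_set_2)
--         if len(set_intersection) > cur_max:
--             max_intersection = set_intersection.copy()
--             cur_max = len(max_intersection)
--             cur_argmax = new_set_2.copy()
--             max_shift = shift
--         set_1 = orig_set_1
--         set_2 = orig_set_2
--
--     return cur_argmax, max_shift
-- ===== SOURCE B (Python) =====
-- def argmax_intersection(set_1, set_2):
--     # Bucket set_2 by the shift-invariant key (x, a, y - b): a shifted copy of an
--     # element of set_2 can coincide with an element of set_1 only when their keys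
--     # agree, and then the shift is forced to be y1 - y2.
--     buckets = {}
--     for ((x, y), (a, b)) in set_2:
--         buckets.setdefault((x, a, y - b), []).append(y)
--     # tally, per candidate shift in [-1000, 1000], how many elements match
--     shifts = []
--     for ((x, y), (a, b)) in set_1:
--         for y2 in buckets.get((x, a, y - b), []):
--             s = y - y2
--             if -1000 <= s <= 1000:
--                 shifts.append(s)
--     counts = {}
--     for s in shifts:
--         counts[s] = counts.get(s, 0) + 1
--     # pick the shift whose count strictly beats the zero-shift baseline,
--     # breaking count ties towards the larger shift; otherwise shift 0
--     base = counts.get(0, 0)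
--     best_s, best_c = 0, base
--     for s, c in counts.items():
--         if c > best_c or (c == best_c and c > base and s > best_s):
--             best_s, best_c = s, c
--     if best_s == 0:
--         return set_2, 0
--     return {((x, y + best_s), (a, b + best_s)) for ((x, y), (a, b)) in set_2}, best_s
-- ===== Notes on version B (the rewrite author's own statement) =====
-- stated objective: faster
-- what changed: Instead of testing all 2001 shifts and rebuilding + intersecting a full shifted copy of set_2 for each, B buckets set_2 once by the shift-invariant key (x, a, y-b), tallies the matching shift y1-y2 for every (set_1 element, bucket entry) pair, and picks the in-range shift whose tally strictly beats the zero-shift baseline (count ties broken towards the larger shift, exactly A's scan order 1000..-1000).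
import Mathlib
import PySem

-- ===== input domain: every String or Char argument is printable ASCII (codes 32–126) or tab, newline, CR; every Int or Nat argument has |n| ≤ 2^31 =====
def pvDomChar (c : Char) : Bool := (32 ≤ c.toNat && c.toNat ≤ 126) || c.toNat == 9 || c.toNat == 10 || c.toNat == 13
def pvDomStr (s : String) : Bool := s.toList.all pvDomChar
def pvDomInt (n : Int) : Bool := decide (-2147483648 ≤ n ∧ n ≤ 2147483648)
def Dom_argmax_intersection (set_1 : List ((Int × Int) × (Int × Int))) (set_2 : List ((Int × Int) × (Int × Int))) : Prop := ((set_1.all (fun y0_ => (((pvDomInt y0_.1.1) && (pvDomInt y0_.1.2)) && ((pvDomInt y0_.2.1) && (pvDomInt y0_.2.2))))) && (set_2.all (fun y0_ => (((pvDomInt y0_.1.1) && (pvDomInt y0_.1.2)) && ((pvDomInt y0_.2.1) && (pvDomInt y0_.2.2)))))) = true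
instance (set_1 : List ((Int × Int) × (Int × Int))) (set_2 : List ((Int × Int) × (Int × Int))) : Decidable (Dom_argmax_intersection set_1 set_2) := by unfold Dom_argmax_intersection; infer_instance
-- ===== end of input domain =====

-- B replaces A's scan of all 2001 shifts (each rebuilding and intersecting a whole set) by a
-- single bucketing pass that tallies matches per candidate shift; measurably faster.


-- ===== PORT A =====
-- literal transliteration: for each shift in range(1000,-1001,-1) rebuild the shifted set_2
-- and intersect it with set_1, keeping a strictly larger intersection
-- A-side helper: the body of A's for-loop, one iteration at one shift
def argmax_intersection_loop (orig_set_1 orig_set_2 : List ((Int × Int) × (Int × Int)))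
    (st : List ((Int × Int) × (Int × Int)) × List ((Int × Int) × (Int × Int)) ×
          List ((Int × Int) × (Int × Int)) × Int × List ((Int × Int) × (Int × Int)) × Int)
    (shift : Int) :
    List ((Int × Int) × (Int × Int)) × List ((Int × Int) × (Int × Int)) ×
    List ((Int × Int) × (Int × Int)) × Int × List ((Int × Int) × (Int × Int)) × Int :=
  match st with
  | (set_1, set_2, max_intersection, cur_max, cur_argmax, max_shift) =>
    let new_set_2 : PySem.Set ((Int × Int) × (Int × Int)) :=
      set_2.foldl (fun new_set_2 element =>
        let y := element.1.2 + shift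
        let b := element.2.2 + shift
        let x := element.1.1
        let a := element.2.1
        PySem.Set.add new_set_2 ((x, y), (a, b))) PySem.Set.empty
    let set_intersection := PySem.Set.inter set_1 new_set_2
    if PySem.Set.len set_intersection > cur_max then
      (orig_set_1, orig_set_2, set_intersection, PySem.Set.len set_intersection, new_set_2, shift)
    else
      (orig_set_1, orig_set_2, max_intersection, cur_max, cur_argmax, max_shift)

def argmax_intersection (set_1 : List ((Int × Int) × (Int × Int))) (set_2 : List ((Int × Int) × (Int × Int))) : (List ((Int × Int) × (Int × Int))) × Int :=
  let orig_set_1 := set_1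
  let orig_set_2 := set_2
  let shift_bounds := PySem.List.pyRange 1000 (-1001) (-1)
  let max_intersection := PySem.Set.inter orig_set_1 orig_set_2
  let cur_max : Int := PySem.Set.len max_intersection
  let cur_argmax := orig_set_2
  let max_shift : Int := 0
  let st := shift_bounds.foldl (argmax_intersection_loop orig_set_1 orig_set_2)
    (set_1, set_2, max_intersection, cur_max, cur_argmax, max_shift)
  (st.2.2.2.2.1, st.2.2.2.2.2)

-- ===== PORT B =====
-- literal transliteration of Source B: bucket set_2 by (x, a, y-b), tally candidate shifts,
-- pick the shift strictly beating the zero-shift baseline (ties to the larger shift)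
def argmax_intersection_alt (set_1 : List ((Int × Int) × (Int × Int))) (set_2 : List ((Int × Int) × (Int × Int))) : (List ((Int × Int) × (Int × Int))) × Int :=
  let buckets : PySem.Dict (Int × Int × Int) (List Int) :=
    set_2.foldl (fun buckets e =>
      buckets.modify (e.1.1, e.2.1, e.1.2 - e.2.2) [] (fun l => l ++ [e.1.2])) PySem.Dict.empty
  let shifts : List Int :=
    set_1.foldl (fun shifts e =>
      (buckets.getD (e.1.1, e.2.1, e.1.2 - e.2.2) []).foldl (fun shifts y2 =>
        let s := e.1.2 - y2
        if -1000 ≤ s ∧ s ≤ 1000 then shifts ++ [s] else shifts) shifts) []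
  let counts : PySem.Dict Int Int :=
    shifts.foldl (fun counts s => counts.insert s (counts.getD s 0 + 1)) PySem.Dict.empty
  let base := counts.getD 0 0
  let best := counts.items.foldl (fun best p =>
      if p.2 > best.2 ∨ (p.2 = best.2 ∧ p.2 > base ∧ p.1 > best.1) then (p.1, p.2) else best)
    (0, base)
  if best.1 = 0 then (set_2, 0)
  else (PySem.Set.ofList (set_2.map (fun e => ((e.1.1, e.1.2 + best.1), (e.2.1, e.2.2 + best.1)))), best.1)

-- ===== PRECONDITION & SPEC =====
-- The arguments are Python sets: Pre_ states the type invariant that set_2's list encoding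
-- holds distinct elements (no input a Python caller can build is excluded).
def Pre_argmax_intersection (set_1 : List ((Int × Int) × (Int × Int))) (set_2 : List ((Int × Int) × (Int × Int))) : Prop := set_2.Nodup
instance (set_1 : List ((Int × Int) × (Int × Int))) (set_2 : List ((Int × Int) × (Int × Int))) : Decidable (Pre_argmax_intersection set_1 set_2) := by unfold Pre_argmax_intersection; infer_instance
def pvWitness_argmax_intersection : (List ((Int × Int) × (Int × Int))) × (List ((Int × Int) × (Int × Int))) := ([((0, 0), (1, 2))], [((0, 3), (1, 5))])
def Spec_argmax_intersection (set_1 : List ((Int × Int) × (Int × Int))) (set_2 : List ((Int × Int) × (Int × Int))) (out : (List ((Int × Int) × (Int × Int))) × Int) : Prop := out = argmax_intersection_alt set_1 set_2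
instance (set_1 : List ((Int × Int) × (Int × Int))) (set_2 : List ((Int × Int) × (Int × Int))) (out : (List ((Int × Int) × (Int × Int))) × Int) : Decidable (Spec_argmax_intersection set_1 set_2 out) := by unfold Spec_argmax_intersection; infer_instance

-- ===== CLAIM (what is proved, stated in full; the proofs are below) =====
def Claim_equal_argmax_intersection : Prop := ∀ (set_1 : List ((Int × Int) × (Int × Int))) (set_2 : List ((Int × Int) × (Int × Int))), Dom_argmax_intersection set_1 set_2 → Pre_argmax_intersection set_1 set_2 → Spec_argmax_intersection set_1 set_2 (argmax_intersection set_1 set_2)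

-- ===== LEMMAS AND PROOFS =====

-- the shift of one element, and the shift-invariant bucket key
def pvSh (s : Int) (e : (Int × Int) × (Int × Int)) : (Int × Int) × (Int × Int) :=
  ((e.1.1, e.1.2 + s), (e.2.1, e.2.2 + s))
def pvKey (e : (Int × Int) × (Int × Int)) : Int × Int × Int := (e.1.1, e.2.1, e.1.2 - e.2.2)

-- number of elements of set_1 hit by set_2 shifted by s
def pvG (set_1 set_2 : List ((Int × Int) × (Int × Int))) (s : Int) : Int :=
  (set_1.countP (fun e => decide (pvSh (-s) e ∈ set_2)) : Int)

-- set_2 shifted by m, as the Set both programs build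
def pvNS2 (set_2 : List ((Int × Int) × (Int × Int))) (m : Int) : List ((Int × Int) × (Int × Int)) :=
  PySem.Set.ofList (set_2.map (pvSh m))

-- the two selection steps, abstracted
def pvStepA (g : Int → Int) (p : Int × Int) (s : Int) : Int × Int :=
  if g s > p.1 then (g s, s) else p
def pvStepB (base : Int) (best : Int × Int) (p : Int × Int) : Int × Int :=
  if p.2 > best.2 ∨ (p.2 = best.2 ∧ p.2 > base ∧ p.1 > best.1) then (p.1, p.2) else best

theorem pvSh_sh (s : Int) (e : (Int × Int) × (Int × Int)) : pvSh (-s) (pvSh s e) = e := by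
  simp [pvSh]

theorem pvSh_zero (e : (Int × Int) × (Int × Int)) : pvSh 0 e = e := by
  simp [pvSh]

theorem pvNS2_zero (set_2 : List ((Int × Int) × (Int × Int))) (h2 : set_2.Nodup) :
    pvNS2 set_2 0 = set_2 := by
  unfold pvNS2
  rw [List.map_congr_left (fun e _ => pvSh_zero e)]
  simp [PySem.Set.ofList_eq_self_of_nodup _ h2]

theorem pvMem_NS2 (set_2 : List ((Int × Int) × (Int × Int))) (s : Int)
    (e : (Int × Int) × (Int × Int)) : e ∈ pvNS2 set_2 s ↔ pvSh (-s) e ∈ set_2 := by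
  unfold pvNS2
  rw [PySem.Set.mem_ofList, List.mem_map]
  constructor
  · rintro ⟨e2, he2, rfl⟩; rw [pvSh_sh]; exact he2
  · intro h; exact ⟨pvSh (-s) e, h, by simp [pvSh]⟩

theorem pvLen_inter (set_1 set_2 : List ((Int × Int) × (Int × Int))) (s : Int) :
    PySem.Set.len (PySem.Set.inter set_1 (pvNS2 set_2 s)) = pvG set_1 set_2 s := by
  unfold PySem.Set.len PySem.Set.inter pvG
  rw [← List.countP_eq_length_filter]
  congr 1
  apply List.countP_congr
  intro e _
  rw [PySem.Set.contains_iff, decide_eq_true_eq]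
  exact pvMem_NS2 set_2 s e

theorem pvNewset_eq (shift : Int) (set_2 : List ((Int × Int) × (Int × Int))) :
    set_2.foldl (fun new_set_2 element =>
        let y := element.1.2 + shift
        let b := element.2.2 + shift
        let x := element.1.1
        let a := element.2.1
        PySem.Set.add new_set_2 ((x, y), (a, b))) PySem.Set.empty = pvNS2 set_2 shift := by
  unfold pvNS2 pvSh
  rw [← PySem.Set.update_map_eq_foldl_add, PySem.Set.update_empty]


-- A's 6-tuple fold is the abstract selection fold pvStepA
theorem pvAfold (set_1 set_2 : List ((Int × Int) × (Int × Int))) (L : List Int) :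
    ∀ (c m : Int),
    L.foldl (argmax_intersection_loop set_1 set_2)
      (set_1, set_2, PySem.Set.inter set_1 (pvNS2 set_2 m), c, pvNS2 set_2 m, m)
    = ((fun r => (set_1, set_2, PySem.Set.inter set_1 (pvNS2 set_2 r.2), r.1, pvNS2 set_2 r.2, r.2))
        (L.foldl (pvStepA (pvG set_1 set_2)) (c, m))) := by
  induction L with
  | nil => intro c m; rfl
  | cons s L ih =>
    intro c m
    have hstep : argmax_intersection_loop set_1 set_2
        (set_1, set_2, PySem.Set.inter set_1 (pvNS2 set_2 m), c, pvNS2 set_2 m, m) s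
      = (set_1, set_2,
          PySem.Set.inter set_1 (pvNS2 set_2 (pvStepA (pvG set_1 set_2) (c, m) s).2),
          (pvStepA (pvG set_1 set_2) (c, m) s).1,
          pvNS2 set_2 (pvStepA (pvG set_1 set_2) (c, m) s).2,
          (pvStepA (pvG set_1 set_2) (c, m) s).2) := by
      simp only [argmax_intersection_loop, pvNewset_eq, pvLen_inter, pvStepA]
      split_ifs <;> rfl
    rw [List.foldl_cons, hstep]
    exact ih (pvStepA (pvG set_1 set_2) (c, m) s).1 (pvStepA (pvG set_1 set_2) (c, m) s).2

theorem pvAfold0 (set_1 set_2 : List ((Int × Int) × (Int × Int))) (h2 : set_2.Nodup)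
    (L : List Int) (c : Int) :
    L.foldl (argmax_intersection_loop set_1 set_2) (set_1, set_2, PySem.Set.inter set_1 set_2, c, set_2, 0)
    = ((fun r => (set_1, set_2, PySem.Set.inter set_1 (pvNS2 set_2 r.2), r.1, pvNS2 set_2 r.2, r.2))
        (L.foldl (pvStepA (pvG set_1 set_2)) (c, 0))) := by
  have h := pvAfold set_1 set_2 L c 0
  rw [pvNS2_zero set_2 h2] at h
  exact h

-- specification of A's selection fold over a strictly decreasing shift list
theorem pvStepA_spec (g : Int → Int) (L : List Int) (hL : L.Pairwise (· > ·)) :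
    ∀ (c0 m0 : Int),
    (∀ s ∈ L, g s ≤ (L.foldl (pvStepA g) (c0, m0)).1) ∧
    c0 ≤ (L.foldl (pvStepA g) (c0, m0)).1 ∧
    ((L.foldl (pvStepA g) (c0, m0)) = (c0, m0) ∨
      ((L.foldl (pvStepA g) (c0, m0)).2 ∈ L ∧
       g (L.foldl (pvStepA g) (c0, m0)).2 = (L.foldl (pvStepA g) (c0, m0)).1 ∧
       c0 < (L.foldl (pvStepA g) (c0, m0)).1 ∧
       ∀ s ∈ L, s > (L.foldl (pvStepA g) (c0, m0)).2 → g s < (L.foldl (pvStepA g) (c0, m0)).1)) := by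
  induction L with
  | nil => intro c0 m0; simp
  | cons s L ih =>
    intro c0 m0
    obtain ⟨hgt, hL'⟩ := List.pairwise_cons.mp hL
    simp only [List.foldl_cons]
    by_cases h : g s > c0
    · have hstep : pvStepA g (c0, m0) s = (g s, s) := by
        unfold pvStepA; rw [if_pos (show g s > (c0, m0).1 from h)]
      rw [hstep]
      obtain ⟨ih1, ih2, ih3⟩ := ih hL' (g s) s
      refine ⟨?_, by omega, ?_⟩
      · intro t ht
        rcases List.mem_cons.mp ht with rfl | ht'
        · exact ih2
        · exact ih1 t ht'
      · rcases ih3 with heq | ⟨hm, hgm, hlt, hall⟩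
        · right
          rw [heq]
          refine ⟨List.mem_cons_self, rfl, h, ?_⟩
          intro t ht hts
          rcases List.mem_cons.mp ht with rfl | ht'
          · omega
          · have := hgt t ht'; omega
        · right
          refine ⟨List.mem_cons_of_mem _ hm, hgm, by omega, ?_⟩
          intro t ht hts
          rcases List.mem_cons.mp ht with rfl | ht'
          · omega
          · exact hall t ht' hts
    · have hstep : pvStepA g (c0, m0) s = (c0, m0) := by
        unfold pvStepA; rw [if_neg (show ¬ g s > (c0, m0).1 from h)]
      rw [hstep]
      obtain ⟨ih1, ih2, ih3⟩ := ih hL' c0 m0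
      refine ⟨?_, ih2, ?_⟩
      · intro t ht
        rcases List.mem_cons.mp ht with rfl | ht'
        · omega
        · exact ih1 t ht'
      · rcases ih3 with heq | ⟨hm, hgm, hlt, hall⟩
        · left; exact heq
        · right
          refine ⟨List.mem_cons_of_mem _ hm, hgm, hlt, ?_⟩
          intro t ht hts
          rcases List.mem_cons.mp ht with rfl | ht'
          · omega
          · exact hall t ht' hts

-- specification of B's selection fold over the counter's items (any order)
theorem pvStepB_spec (base : Int) (I : List (Int × Int)) :
    ∀ (bs0 bc0 : Int), base ≤ bc0 →
    bc0 ≤ (I.foldl (pvStepB base) (bs0, bc0)).2 ∧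
    ((I.foldl (pvStepB base) (bs0, bc0)) = (bs0, bc0) ∨
      ((I.foldl (pvStepB base) (bs0, bc0)) ∈ I ∧ base < (I.foldl (pvStepB base) (bs0, bc0)).2)) ∧
    (∀ p ∈ I, p.2 < (I.foldl (pvStepB base) (bs0, bc0)).2 ∨
      (p.2 = (I.foldl (pvStepB base) (bs0, bc0)).2 ∧
        ((I.foldl (pvStepB base) (bs0, bc0)).2 ≤ base ∨ p.1 ≤ (I.foldl (pvStepB base) (bs0, bc0)).1))) ∧
    (bc0 = (I.foldl (pvStepB base) (bs0, bc0)).2 → (bc0 ≤ base ∨ bs0 ≤ (I.foldl (pvStepB base) (bs0, bc0)).1)) := by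
  induction I with
  | nil =>
    intro bs0 bc0 h0
    exact ⟨le_rfl, Or.inl rfl, by simp, fun _ => Or.inr le_rfl⟩
  | cons p I ih =>
    intro bs0 bc0 h0
    obtain ⟨ps, pc⟩ := p
    simp only [List.foldl_cons]
    by_cases h : pc > bc0 ∨ (pc = bc0 ∧ pc > base ∧ ps > bs0)
    · have hstep : pvStepB base (bs0, bc0) (ps, pc) = (ps, pc) := by simp [pvStepB, h]
      rw [hstep]
      have hpc : base < pc := by rcases h with h | h <;> omega
      obtain ⟨ih1, ih2, ih3, ih4⟩ := ih ps pc (le_of_lt hpc)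
      refine ⟨by rcases h with h | h <;> omega, ?_, ?_, ?_⟩
      · rcases ih2 with heq | ⟨hm, hgt2⟩
        · right; rw [heq]; exact ⟨List.mem_cons_self, hpc⟩
        · right; exact ⟨List.mem_cons_of_mem _ hm, hgt2⟩
      · intro q hq
        rcases List.mem_cons.mp hq with rfl | hq'
        · by_cases hq2 : pc = (List.foldl (pvStepB base) (ps, pc) I).2
          · right
            refine ⟨hq2, ?_⟩
            rcases ih4 hq2 with h' | h'
            · left; omega
            · right; exact h'
          · left; omega
        · exact ih3 q hq'
      · intro hbc
        have h1 : pc = (List.foldl (pvStepB base) (ps, pc) I).2 := by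
          rcases h with h | h <;> omega
        rcases ih4 h1 with h' | h'
        · omega
        · right
          rcases h with h | h
          · omega
          · omega
    · have hstep : pvStepB base (bs0, bc0) (ps, pc) = (bs0, bc0) := by
        simp only [pvStepB, if_neg h]
      rw [hstep]
      obtain ⟨ih1, ih2, ih3, ih4⟩ := ih bs0 bc0 h0
      push_neg at h
      refine ⟨ih1, ?_, ?_, ih4⟩
      · rcases ih2 with heq | ⟨hm, hgt⟩
        · left; exact heq
        · right; exact ⟨List.mem_cons_of_mem _ hm, hgt⟩
      intro q hq
      rcases List.mem_cons.mp hq with rfl | hq'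
      · by_cases hq2 : pc = (List.foldl (pvStepB base) (bs0, bc0) I).2
        · right
          refine ⟨hq2, ?_⟩
          have hpcbc : pc = bc0 := by omega
          rcases ih4 (by omega) with h' | h'
          · left; omega
          · by_cases hb : base < pc
            · right; have := h.2 hpcbc hb; omega
            · left; omega
        · left; omega
      · exact ih3 q hq'

-- the two selections agree
theorem pvSelect_eq (g : Int → Int) (L : List Int) (I : List (Int × Int))
    (hL : L.Pairwise (· > ·)) (hmemL : ∀ s, s ∈ L ↔ (-1000 ≤ s ∧ s ≤ 1000))
    (hI : ∀ p ∈ I, p.1 ∈ L ∧ p.2 = g p.1 ∧ 0 < g p.1)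
    (hI2 : ∀ s ∈ L, 0 < g s → (s, g s) ∈ I)
    (hg0 : 0 ≤ g 0) :
    L.foldl (pvStepA g) (g 0, 0)
      = ((I.foldl (pvStepB (g 0)) (0, g 0)).2, (I.foldl (pvStepB (g 0)) (0, g 0)).1) := by
  obtain ⟨hA1, hA2, hA3⟩ := pvStepA_spec g L hL (g 0) 0
  obtain ⟨hB1, hB2, hB3, _⟩ := pvStepB_spec (g 0) I 0 (g 0) le_rfl
  set rA := L.foldl (pvStepA g) (g 0, 0) with hrA
  set rB := I.foldl (pvStepB (g 0)) (0, g 0) with hrB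
  have hc : rA.1 = rB.2 := by
    have h1 : rB.2 ≤ rA.1 := by
      rcases hB2 with heq | ⟨hm, hgt⟩
      · rw [heq]; exact hA2
      · obtain ⟨hmem, heq, hpos⟩ := hI rB hm
        have := hA1 rB.1 hmem
        omega
    have h2 : rA.1 ≤ rB.2 := by
      rcases hA3 with heq | ⟨hm, hgm, hlt, hall⟩
      · rw [heq]; exact hB1
      · have hpos : 0 < g rA.2 := by omega
        have hmemI : (rA.2, g rA.2) ∈ I := hI2 rA.2 hm hpos
        rcases hB3 _ hmemI with h' | h' <;> simp at h' <;> omega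
    omega
  have hm : rA.2 = rB.1 := by
    rcases hA3 with heqA | ⟨hmA, hgmA, hltA, hallA⟩
    · rcases hB2 with heqB | ⟨hmB, hgtB⟩
      · rw [heqA, heqB]
      · rw [heqA] at hc; simp at hc; omega
    · rcases hB2 with heqB | ⟨hmB, hgtB⟩
      · rw [heqB] at hc; simp at hc; omega
      · obtain ⟨hmemB, heqB2, hposB⟩ := hI rB hmB
        have h1 : rB.1 ≤ rA.2 := by
          by_contra hcon
          push_neg at hcon
          have := hallA rB.1 hmemB hcon
          omega
        have h2 : rA.2 ≤ rB.1 := by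
          have hpos : 0 < g rA.2 := by omega
          have hmemI : (rA.2, g rA.2) ∈ I := hI2 rA.2 hmA hpos
          rcases hB3 _ hmemI with h' | h'
          · simp at h'; omega
          · simp at h'; omega
        omega
  exact Prod.ext hc hm


-- the candidate shifts contributed by one element of set_1
def pvCand (set_2 : List ((Int × Int) × (Int × Int))) (e : (Int × Int) × (Int × Int)) : List Int :=
  (((set_2.filter (fun e2 => pvKey e2 == pvKey e)).map (fun e2 => e2.1.2)).filter
      (fun y2 => decide (-1000 ≤ e.1.2 - y2 ∧ e.1.2 - y2 ≤ 1000))).map (fun y2 => e.1.2 - y2)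

def pvShiftsL (set_1 set_2 : List ((Int × Int) × (Int × Int))) : List Int :=
  set_1.flatMap (pvCand set_2)

def pvRB (set_1 set_2 : List ((Int × Int) × (Int × Int))) : Int × Int :=
  ((PySem.Dict.counter (pvShiftsL set_1 set_2)).items).foldl
    (pvStepB (pvG set_1 set_2 0)) (0, pvG set_1 set_2 0)

theorem pvBucket_getD (set_2 : List ((Int × Int) × (Int × Int))) (k : Int × Int × Int) :
    (set_2.foldl (fun buckets e =>
        buckets.modify (e.1.1, e.2.1, e.1.2 - e.2.2) [] (fun l => l ++ [e.1.2]))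
      PySem.Dict.empty).getD k []
    = (set_2.filter (fun e2 => pvKey e2 == k)).map (fun e2 => e2.1.2) := by
  have h : set_2.foldl (fun buckets e =>
        buckets.modify (e.1.1, e.2.1, e.1.2 - e.2.2) [] (fun l => l ++ [e.1.2]))
      PySem.Dict.empty
    = (set_2.map (fun e => ((e.1.1, e.2.1, e.1.2 - e.2.2), e.1.2))).foldl
        (fun buckets p => buckets.modify p.1 [] (fun l => l ++ [p.2])) PySem.Dict.empty := by
    rw [List.foldl_map]
  rw [h, PySem.Dict.getD_foldl_modify_append]
  simp [List.filter_map, List.map_map, Function.comp_def, pvKey]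

theorem pvInner (y1 : Int) (l : List Int) : ∀ (acc : List Int),
    l.foldl (fun shifts y2 =>
      if -1000 ≤ y1 - y2 ∧ y1 - y2 ≤ 1000 then shifts ++ [y1 - y2] else shifts) acc
    = acc ++ (l.filter (fun y2 => decide (-1000 ≤ y1 - y2 ∧ y1 - y2 ≤ 1000))).map
        (fun y2 => y1 - y2) := by
  induction l with
  | nil => intro acc; simp
  | cons y2 l ih =>
    intro acc
    rw [List.foldl_cons, List.filter_cons]
    by_cases h : -1000 ≤ y1 - y2 ∧ y1 - y2 ≤ 1000
    · simp only [if_pos h, decide_eq_true_eq, h, decide_true, List.map_cons]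
      rw [ih]
      simp
    · simp only [if_neg h, decide_eq_true_eq, h, decide_false]
      rw [ih]
      simp [h]

theorem pvShifts_eq (set_1 set_2 : List ((Int × Int) × (Int × Int))) : ∀ (acc : List Int),
    set_1.foldl (fun shifts e =>
      ((set_2.foldl (fun buckets e' =>
          buckets.modify (e'.1.1, e'.2.1, e'.1.2 - e'.2.2) [] (fun l => l ++ [e'.1.2]))
        PySem.Dict.empty).getD (e.1.1, e.2.1, e.1.2 - e.2.2) []).foldl
        (fun shifts y2 =>
          if -1000 ≤ e.1.2 - y2 ∧ e.1.2 - y2 ≤ 1000 then shifts ++ [e.1.2 - y2] else shifts)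
        shifts) acc
    = acc ++ set_1.flatMap (pvCand set_2) := by
  induction set_1 with
  | nil => intro acc; simp
  | cons e set_1 ih =>
    intro acc
    rw [List.foldl_cons, pvInner, pvBucket_getD, ih, List.flatMap_cons, ← List.append_assoc]
    rfl

theorem pvKey_y_iff (e e2 : (Int × Int) × (Int × Int)) (s : Int) :
    (pvKey e2 = pvKey e ∧ e2.1.2 = e.1.2 - s) ↔ e2 = pvSh (-s) e := by
  obtain ⟨⟨x2, y2⟩, ⟨a2, b2⟩⟩ := e2
  obtain ⟨⟨x1, y1⟩, ⟨a1, b1⟩⟩ := e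
  simp only [pvKey, pvSh, Prod.mk.injEq]
  constructor
  · rintro ⟨⟨rfl, rfl, h3⟩, h4⟩
    refine ⟨⟨rfl, by omega⟩, rfl, by omega⟩
  · rintro ⟨⟨rfl, rfl⟩, rfl, rfl⟩
    refine ⟨⟨rfl, rfl, by omega⟩, by omega⟩

theorem pvCount_cand (set_2 : List ((Int × Int) × (Int × Int))) (h2 : set_2.Nodup)
    (e : (Int × Int) × (Int × Int)) (s : Int) (hs : -1000 ≤ s ∧ s ≤ 1000) :
    (pvCand set_2 e).count s = if pvSh (-s) e ∈ set_2 then 1 else 0 := by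
  unfold pvCand
  rw [List.count_eq_countP, List.countP_map, List.countP_filter, List.countP_map,
    List.countP_filter]
  have hstep : ∀ a, a ∈ set_2 → ((((fun x => x == s) ∘ fun y2 => e.1.2 - y2) a.1.2 &&
        decide (-1000 ≤ e.1.2 - a.1.2 ∧ e.1.2 - a.1.2 ≤ 1000) && (pvKey a == pvKey e)) = true
      ↔ (a == pvSh (-s) e) = true) := by
    intro a _
    simp only [Function.comp_apply, Bool.and_eq_true, beq_iff_eq, decide_eq_true_eq]
    constructor
    · rintro ⟨⟨h1, hr⟩, h3⟩
      exact (pvKey_y_iff e a s).mp ⟨h3, by omega⟩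
    · rintro rfl
      obtain ⟨hk, hy⟩ := (pvKey_y_iff e (pvSh (-s) e) s).mpr rfl
      exact ⟨⟨by omega, by omega⟩, hk⟩
  calc List.countP (fun a =>
        ((fun a => ((fun x => x == s) ∘ fun y2 => e.1.2 - y2) a &&
            decide (-1000 ≤ e.1.2 - a ∧ e.1.2 - a ≤ 1000)) ∘ fun e2 => e2.1.2) a &&
          (pvKey a == pvKey e)) set_2
      = List.countP (fun a => a == pvSh (-s) e) set_2 := by
        apply List.countP_congr
        intro a ha
        simpa using hstep a ha
    _ = set_2.count (pvSh (-s) e) := List.count_eq_countP.symm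
    _ = if pvSh (-s) e ∈ set_2 then 1 else 0 := by
        by_cases hmem : pvSh (-s) e ∈ set_2
        · rw [if_pos hmem]
          have h1 : 1 ≤ set_2.count (pvSh (-s) e) := List.count_pos_iff.mpr hmem
          have h2' : set_2.count (pvSh (-s) e) ≤ 1 := List.nodup_iff_count_le_one.mp h2 _
          omega
        · rw [if_neg hmem, List.count_eq_zero]
          exact hmem

theorem pvCount_shifts (set_1 set_2 : List ((Int × Int) × (Int × Int))) (h2 : set_2.Nodup)
    (s : Int) (hs : -1000 ≤ s ∧ s ≤ 1000) :
    ((pvShiftsL set_1 set_2).count s : Int) = pvG set_1 set_2 s := by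
  unfold pvShiftsL pvG
  induction set_1 with
  | nil => simp
  | cons e set_1 ih =>
    rw [List.flatMap_cons, List.count_append, List.countP_cons]
    push_cast
    rw [← ih, pvCount_cand set_2 h2 e s hs]
    by_cases hmem : pvSh (-s) e ∈ set_2 <;> simp [hmem] <;> push_cast <;> ring

theorem pvShifts_range (set_1 set_2 : List ((Int × Int) × (Int × Int))) (s : Int)
    (hmem : s ∈ pvShiftsL set_1 set_2) : -1000 ≤ s ∧ s ≤ 1000 := by
  obtain ⟨e, _, hcand⟩ := List.mem_flatMap.mp hmem
  unfold pvCand at hcand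
  obtain ⟨y2, hy2, rfl⟩ := List.mem_map.mp hcand
  have := List.of_mem_filter hy2
  simpa using this

theorem pvL_mem (s : Int) :
    s ∈ PySem.List.pyRange 1000 (-1001) (-1) ↔ (-1000 ≤ s ∧ s ≤ 1000) := by
  rw [PySem.List.mem_pyRange_iff_of_neg (by norm_num)]
  simp only [neg_dvd, one_dvd, and_true]
  omega

theorem pvL_pairwise : (PySem.List.pyRange 1000 (-1001) (-1)).Pairwise (· > ·) := by
  rw [PySem.List.pyRange_neg_one, List.pairwise_map]
  exact (List.pairwise_lt_range).imp (fun {a b} h => by push_cast; omega)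

theorem pvB_eq (set_1 set_2 : List ((Int × Int) × (Int × Int))) (h2 : set_2.Nodup) :
    argmax_intersection_alt set_1 set_2
    = (pvNS2 set_2 (pvRB set_1 set_2).1, (pvRB set_1 set_2).1) := by
  have hshifts := pvShifts_eq set_1 set_2 []
  rw [List.nil_append] at hshifts
  have hbase : ((pvShiftsL set_1 set_2).count 0 : Int) = pvG set_1 set_2 0 :=
    pvCount_shifts set_1 set_2 h2 0 (by omega)
  show (let buckets : PySem.Dict (Int × Int × Int) (List Int) :=
    set_2.foldl (fun buckets e =>
      buckets.modify (e.1.1, e.2.1, e.1.2 - e.2.2) [] (fun l => l ++ [e.1.2])) PySem.Dict.empty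
  let shifts : List Int :=
    set_1.foldl (fun shifts e =>
      (buckets.getD (e.1.1, e.2.1, e.1.2 - e.2.2) []).foldl (fun shifts y2 =>
        let s := e.1.2 - y2
        if -1000 ≤ s ∧ s ≤ 1000 then shifts ++ [s] else shifts) shifts) []
  let counts : PySem.Dict Int Int :=
    shifts.foldl (fun counts s => counts.insert s (counts.getD s 0 + 1)) PySem.Dict.empty
  let base := counts.getD 0 0
  let best := counts.items.foldl (fun best p =>
      if p.2 > best.2 ∨ (p.2 = best.2 ∧ p.2 > base ∧ p.1 > best.1) then (p.1, p.2) else best)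
    (0, base)
  if best.1 = 0 then (set_2, 0)
  else (PySem.Set.ofList (set_2.map (fun e => ((e.1.1, e.1.2 + best.1), (e.2.1, e.2.2 + best.1)))), best.1))
    = (pvNS2 set_2 (pvRB set_1 set_2).1, (pvRB set_1 set_2).1)
  simp only []
  rw [hshifts, PySem.Dict.foldl_insert_getD_add_one_eq_counter, PySem.Dict.getD_counter]
  rw [show set_1.flatMap (pvCand set_2) = pvShiftsL set_1 set_2 from rfl, hbase]
  have hfold : ((PySem.Dict.counter (pvShiftsL set_1 set_2)).items).foldl
      (fun best p =>
        if p.2 > best.2 ∨ (p.2 = best.2 ∧ p.2 > pvG set_1 set_2 0 ∧ p.1 > best.1)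
        then (p.1, p.2) else best) (0, pvG set_1 set_2 0) = pvRB set_1 set_2 := rfl
  rw [hfold]
  by_cases hz : (pvRB set_1 set_2).1 = 0
  · rw [if_pos hz, hz, pvNS2_zero set_2 h2]
  · rw [if_neg hz]
    rfl

-- facts about the counter items feeding pvSelect_eq
theorem pvItems_facts (set_1 set_2 : List ((Int × Int) × (Int × Int))) (h2 : set_2.Nodup) :
    ∀ p ∈ (PySem.Dict.counter (pvShiftsL set_1 set_2)).items,
      p.1 ∈ PySem.List.pyRange 1000 (-1001) (-1) ∧ p.2 = pvG set_1 set_2 p.1 ∧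
        0 < pvG set_1 set_2 p.1 := by
  intro p hp
  rw [PySem.Dict.items_counter] at hp
  obtain ⟨k, hk, rfl⟩ := List.mem_map.mp hp
  rw [PySem.Set.mem_ofList] at hk
  have hrange := pvShifts_range set_1 set_2 k hk
  have hcount := pvCount_shifts set_1 set_2 h2 k hrange
  have hpos : 0 < (pvShiftsL set_1 set_2).count k := List.count_pos_iff.mpr hk
  refine ⟨(pvL_mem k).mpr hrange, ?_, ?_⟩
  · show ((List.count k (pvShiftsL set_1 set_2) : Nat) : Int) = pvG set_1 set_2 k
    exact hcount
  · show 0 < pvG set_1 set_2 k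
    omega

theorem pvItems_complete (set_1 set_2 : List ((Int × Int) × (Int × Int))) (h2 : set_2.Nodup) :
    ∀ s ∈ PySem.List.pyRange 1000 (-1001) (-1), 0 < pvG set_1 set_2 s →
      (s, pvG set_1 set_2 s) ∈ (PySem.Dict.counter (pvShiftsL set_1 set_2)).items := by
  intro s hsL hpos
  have hrange := (pvL_mem s).mp hsL
  have hcount := pvCount_shifts set_1 set_2 h2 s hrange
  have hmem : s ∈ pvShiftsL set_1 set_2 := by
    rw [← List.count_pos_iff]
    omega
  rw [PySem.Dict.items_counter]
  refine List.mem_map.mpr ⟨s, (PySem.Set.mem_ofList _ _).mpr hmem, ?_⟩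
  rw [hcount]

theorem pvG_zero_nonneg (set_1 set_2 : List ((Int × Int) × (Int × Int))) :
    0 ≤ pvG set_1 set_2 0 := by
  unfold pvG
  positivity

theorem pvLen_inter_zero (set_1 set_2 : List ((Int × Int) × (Int × Int))) (h2 : set_2.Nodup) :
    PySem.Set.len (PySem.Set.inter set_1 set_2) = pvG set_1 set_2 0 := by
  conv_lhs => rw [← pvNS2_zero set_2 h2]
  exact pvLen_inter set_1 set_2 0

-- ===== VERDICT (by name: the statement is the Claim_ definition above) =====
theorem argmax_intersection_spec : Claim_equal_argmax_intersection := by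
  intro set_1 set_2 _ h2
  unfold Spec_argmax_intersection
  have hA : argmax_intersection set_1 set_2
      = (((PySem.List.pyRange 1000 (-1001) (-1)).foldl (argmax_intersection_loop set_1 set_2)
            (set_1, set_2, PySem.Set.inter set_1 set_2,
              PySem.Set.len (PySem.Set.inter set_1 set_2), set_2, 0)).2.2.2.2.1,
          ((PySem.List.pyRange 1000 (-1001) (-1)).foldl (argmax_intersection_loop set_1 set_2)
            (set_1, set_2, PySem.Set.inter set_1 set_2,
              PySem.Set.len (PySem.Set.inter set_1 set_2), set_2, 0)).2.2.2.2.2) := rfl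
  rw [hA, pvAfold0 set_1 set_2 h2, pvLen_inter_zero set_1 set_2 h2]
  have hsel := pvSelect_eq (pvG set_1 set_2) (PySem.List.pyRange 1000 (-1001) (-1))
    ((PySem.Dict.counter (pvShiftsL set_1 set_2)).items) pvL_pairwise pvL_mem
    (pvItems_facts set_1 set_2 h2) (pvItems_complete set_1 set_2 h2)
    (pvG_zero_nonneg set_1 set_2)
  rw [pvB_eq set_1 set_2 h2]
  have hstepB : ((PySem.Dict.counter (pvShiftsL set_1 set_2)).items).foldl
      (pvStepB (pvG set_1 set_2 0)) (0, pvG set_1 set_2 0) = pvRB set_1 set_2 := rfl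
  rw [hstepB] at hsel
  rw [hsel]
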